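-- pv_equiv track=rewrite | github.com/Giantpizzahead/comp-programming | USACO/Archived Contests/January 2019 (Bronze)/guess.py | solve
-- ===== SOURCE A (Python) =====
-- def solve(animals):
--     '''
--     Method 2: Compare each pair of cows to find the maximum number
--     of characteristics that one pair shares. That plus one will be
--     your answer. Time complexity is n^3, but since the problem is
--     limited to 100 animals / 100 characteristics, it should be fine.
--     Hopefully.
--     '''
--     max_sharing = 0
--     for i1, animal1 in enumerate(animals):
--         for i2, animal2 in enumerate(animals):
--             if i2 <= i1:
--                 continue
--             current_sharing = 0
--             for char in animals[animal1]:
--                 if char in animals[animal2]: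
--                     current_sharing += 1
--             if current_sharing > max_sharing:
--                 max_sharing = current_sharing
--     return max_sharing + 1
-- ===== SOURCE B (Python) =====
-- def solve(animals):
--     '''
--     Inverted index: for each characteristic, record the set of animals
--     (by position) that have it.  Then one pass over every characteristic
--     occurrence tallies co-occurrences per animal pair; the best pair's
--     tally plus one is the answer.  The indexed pass avoids rescanning every pair.
--     '''
--     names = list(animals)
--     has_char = {}
--     for i, name in enumerate(names):
--         for c in animals[name]:
--             has_char.setdefault(c, set()).add(i)
--     shared = {}
--     for i, name in enumerate(names):
--         for c in animals[name]:
--             for j in has_char[c]: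
--                 if j > i:
--                     shared[(i, j)] = shared.get((i, j), 0) + 1
--     return max(shared.values(), default=0) + 1
-- ===== Notes on version B (the rewrite author's own statement) =====
-- stated objective: faster
-- what changed: Replaces the all-pairs rescan (for every animal pair, scanning one animal's full characteristic list with a linear membership test into the other's) by an inverted index from characteristic to the set of animal positions having it, followed by a single pass over the characteristic occurrences that tallies co-occurrences per animal pair in a dict; the answer is the maximum tally plus one.
import Mathlib
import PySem

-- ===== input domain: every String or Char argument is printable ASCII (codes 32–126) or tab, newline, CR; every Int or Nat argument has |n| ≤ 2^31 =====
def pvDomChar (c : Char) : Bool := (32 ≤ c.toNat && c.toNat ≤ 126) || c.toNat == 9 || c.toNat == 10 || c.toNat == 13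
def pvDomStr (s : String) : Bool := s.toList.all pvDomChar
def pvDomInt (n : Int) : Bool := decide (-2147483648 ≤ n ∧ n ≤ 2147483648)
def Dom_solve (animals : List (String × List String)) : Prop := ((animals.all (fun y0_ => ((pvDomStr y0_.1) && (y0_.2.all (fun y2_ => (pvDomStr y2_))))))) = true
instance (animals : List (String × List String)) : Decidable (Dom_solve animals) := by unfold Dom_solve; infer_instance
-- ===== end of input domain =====

-- B replaces A's nested all-pairs rescan of characteristic lists by an inverted
-- index (characteristic -> set of animals having it) and a per-pair co-occurrence
-- tally; same result, measured faster in a timing run (objective: faster).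

-- ===== PORT A =====
-- literal port of A; `animals` is the Python dict, iterated as its keys, looked up by key
-- (the lookup animals[animal1] cannot raise KeyError: the key comes from the dict itself,
--  so `getD _ []` is exact here)
def solve (animals : List (String × List String)) : Int :=
  let d := PySem.Dict.mk animals
  ((PySem.List.enumerate d.keys).foldl (fun ms p1 =>
    (PySem.List.enumerate d.keys).foldl (fun ms p2 =>
      if p2.1 ≤ p1.1 then ms
      else
        let cur := (d.getD p1.2 []).foldl (fun (c : Int) ch => if ch ∈ d.getD p2.2 [] then c + 1 else c) 0
        if cur > ms then cur else ms) ms) 0) + 1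

-- ===== PORT B =====
-- port of Source B: an inverted index characteristic -> set of animal positions, then a
-- co-occurrence tally per animal pair; `has_char[c]` cannot raise KeyError (c was indexed),
-- so `getD _ Set.empty` is exact; the tally's maximum does not depend on set iteration order.
def solve_alt (animals : List (String × List String)) : Int :=
  let d := PySem.Dict.mk animals
  let names := d.keys
  let hasChar : PySem.Dict String (PySem.Set Int) :=
    (PySem.List.enumerate names).foldl (fun hc p =>
      (d.getD p.2 []).foldl (fun hc c =>
        hc.modify c PySem.Set.empty (fun s => PySem.Set.add s p.1)) hc)
      PySem.Dict.empty
  let shared : PySem.Dict (Int × Int) Int :=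
    (PySem.List.enumerate names).foldl (fun sh p =>
      (d.getD p.2 []).foldl (fun sh c =>
        (hasChar.getD c PySem.Set.empty).foldl (fun sh j =>
          if p.1 < j then sh.modify (p.1, j) 0 (· + 1) else sh) sh) sh)
      PySem.Dict.empty
  (PySem.List.max? shared.values (fun v => v)).getD 0 + 1

-- ===== PRECONDITION & SPEC =====
def Spec_solve (animals : List (String × List String)) (out : Int) : Prop := out = solve_alt animals
instance (animals : List (String × List String)) (out : Int) : Decidable (Spec_solve animals out) := by unfold Spec_solve; infer_instance

-- ===== CLAIM (what is proved, stated in full; the proofs are below) =====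
def Claim_equal_solve : Prop := ∀ (animals : List (String × List String)), Dom_solve animals → Spec_solve animals (solve animals)

-- ===== LEMMAS AND PROOFS =====

-- the number of characteristics of xs (with multiplicity) that occur in ys — A's inner loop
def share (xs ys : List String) : Int :=
  xs.foldl (fun c ch => if ch ∈ ys then c + 1 else c) 0

-- all ordered pairs (earlier, later) of a list
def pairsOf {α : Type} : List α → List (α × α)
  | [] => []
  | x :: t => t.map (fun y => (x, y)) ++ pairsOf t

-- running maximum starting from 0
def sup0 (l : List Int) : Int := l.foldl max 0

-- shorthand: the dict and the enumerated key list both ports run over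
def dA (animals : List (String × List String)) : PySem.Dict String (List String) :=
  PySem.Dict.mk animals

def EA (animals : List (String × List String)) : List (Int × String) :=
  PySem.List.enumerate (dA animals).keys

-- the common normal form both ports are reduced to
def bestOf (animals : List (String × List String)) : Int :=
  sup0 ((pairsOf (EA animals)).map
    (fun q => share ((dA animals).getD q.1.2 []) ((dA animals).getD q.2.2 [])))

theorem maxIf (m c : Int) : (if c > m then c else m) = max m c := by
  rw [max_def]; split_ifs <;> omega

theorem guardFold {α : Type} (U : Int → α → Int) (i : Int) :
    ∀ (xs : List α) (s : Int) (m : Int),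
      (PySem.List.enumerate xs s).foldl (fun m p => if p.1 ≤ i then m else U m p.2) m =
        if i < s then xs.foldl U m else (xs.drop (i - s + 1).toNat).foldl U m := by
  intro xs
  induction xs with
  | nil => intro s m; simp [PySem.List.enumerate_nil]
  | cons x t ih =>
      intro s m
      rw [PySem.List.enumerate_cons]
      simp only [List.foldl_cons]
      by_cases h : i < s
      · rw [if_neg (by omega : ¬ ((s, x).1 ≤ i)), ih (s + 1) (U m x), if_pos (by omega : i < s + 1),
          if_pos h]
      · rw [if_pos (by omega : (s, x).1 ≤ i), ih (s + 1) m, if_neg h]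
        by_cases h2 : i < s + 1
        · rw [if_pos h2]
          have : (i - s + 1).toNat = 1 := by omega
          rw [this]; rfl
        · rw [if_neg h2]
          have : (i - s + 1).toNat = (i - (s + 1) + 1).toNat + 1 := by omega
          rw [this, List.drop_succ_cons]

theorem pairsOf_map {α β : Type} (g : α → β) :
    ∀ (l : List α), pairsOf (l.map g) = (pairsOf l).map (fun q => (g q.1, g q.2)) := by
  intro l
  induction l with
  | nil => rfl
  | cons x t ih => simp [pairsOf, ih, List.map_map, Function.comp]

theorem outerFold {α : Type} (g : α → α → Int) (full : List α) :
    ∀ (xs : List α) (s : Nat) (m : Int), full.drop s = xs →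
      (PySem.List.enumerate xs (s : Int)).foldl
        (fun m p1 => (full.drop (p1.1 + 1).toNat).foldl (fun m y => max m (g p1.2 y)) m) m =
      (pairsOf xs).foldl (fun m q => max m (g q.1 q.2)) m := by
  intro xs
  induction xs with
  | nil => intro s m _; simp [PySem.List.enumerate_nil, pairsOf]
  | cons x t ih =>
      intro s m hdrop
      rw [PySem.List.enumerate_cons]
      simp only [List.foldl_cons, pairsOf, List.foldl_append, List.foldl_map]
      have hstep : full.drop (s + 1) = t := by rw [← List.drop_drop, hdrop]; rfl
      have hfull : full.drop (((s : Int) + 1).toNat) = t := by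
        have hs : ((s : Int) + 1).toNat = s + 1 := by omega
        rw [hs]; exact hstep
      rw [hfull]
      have heq := ih (s + 1) (t.foldl (fun m y => max m (g x y)) m) hstep
      rw [← heq]
      norm_cast

theorem sup0_map_foldl {α : Type} (f : α → Int) (l : List α) :
    l.foldl (fun m x => max m (f x)) 0 = sup0 (l.map f) := by
  rw [sup0, List.foldl_map]

-- ===== A-side: solve computes bestOf + 1 =====

theorem solve_eq (animals : List (String × List String)) :
    solve animals = bestOf animals + 1 := by
  show (PySem.List.enumerate (dA animals).keys).foldl
      (fun ms p1 => (PySem.List.enumerate (dA animals).keys).foldl (fun ms p2 =>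
          if p2.1 ≤ p1.1 then ms
          else
            let cur := ((dA animals).getD p1.2 []).foldl
              (fun (c : Int) ch => if ch ∈ (dA animals).getD p2.2 [] then c + 1 else c) 0
            if cur > ms then cur else ms) ms) 0 + 1
    = bestOf animals + 1
  congr 1
  have step1 : ∀ (p1 : Int × String) (ms : Int), p1 ∈ EA animals →
      (PySem.List.enumerate (dA animals).keys).foldl (fun ms p2 =>
        if p2.1 ≤ p1.1 then ms
        else
          let cur := ((dA animals).getD p1.2 []).foldl
            (fun (c : Int) ch => if ch ∈ (dA animals).getD p2.2 [] then c + 1 else c) 0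
          if cur > ms then cur else ms) ms
      = ((dA animals).keys.drop (p1.1 + 1).toNat).foldl
          (fun m y => max m (share ((dA animals).getD p1.2 []) ((dA animals).getD y []))) ms := by
    intro p1 ms hmem
    have h0 : 0 ≤ p1.1 := by
      rw [EA, PySem.List.mem_enumerate_iff] at hmem
      obtain ⟨k, hk, rfl⟩ := hmem
      omega
    have hcongr := PySem.List.foldl_congr_mem
      (f := fun ms (p2 : Int × String) =>
        if p2.1 ≤ p1.1 then ms
        else
          let cur := ((dA animals).getD p1.2 []).foldl
            (fun (c : Int) ch => if ch ∈ (dA animals).getD p2.2 [] then c + 1 else c) 0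
          if cur > ms then cur else ms)
      (g := fun ms (p2 : Int × String) =>
        if p2.1 ≤ p1.1 then ms
        else max ms (share ((dA animals).getD p1.2 []) ((dA animals).getD p2.2 [])))
      (l := PySem.List.enumerate (dA animals).keys) (init := ms) ?_
    · rw [hcongr]
      have hg := guardFold
        (fun (m : Int) (y : String) =>
          max m (share ((dA animals).getD p1.2 []) ((dA animals).getD y [])))
        p1.1 (dA animals).keys 0 ms
      rw [hg, if_neg (by omega : ¬ p1.1 < 0)]
      congr 2
      omega
    · intro acc x _
      by_cases hle : x.1 ≤ p1.1
      · simp [hle]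
      · simp only [if_neg hle]
        exact maxIf acc _
  refine Eq.trans (PySem.List.foldl_congr_mem
    (f := fun ms (p1 : Int × String) =>
      (PySem.List.enumerate (dA animals).keys).foldl (fun ms p2 =>
        if p2.1 ≤ p1.1 then ms
        else
          let cur := ((dA animals).getD p1.2 []).foldl
            (fun (c : Int) ch => if ch ∈ (dA animals).getD p2.2 [] then c + 1 else c) 0
          if cur > ms then cur else ms) ms)
    (g := fun ms (p1 : Int × String) =>
      ((dA animals).keys.drop (p1.1 + 1).toNat).foldl
        (fun m y => max m (share ((dA animals).getD p1.2 []) ((dA animals).getD y []))) ms)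
    (l := PySem.List.enumerate (dA animals).keys) (init := 0)
    (fun ms p1 hm => step1 p1 ms hm)) ?_
  have ho := outerFold
    (fun a b => share ((dA animals).getD a []) ((dA animals).getD b []))
    (dA animals).keys (dA animals).keys 0 0 rfl
  norm_num at ho
  refine Eq.trans ho ?_
  have hk : (dA animals).keys = (EA animals).map (fun p => p.2) := by
    rw [EA, PySem.List.map_snd_enumerate]
  rw [hk, pairsOf_map, List.foldl_map, bestOf, sup0_map_foldl]

-- ===== B-side groundwork =====

-- proof-side names for B's two folds (definitionally the lets inside solve_alt)
def hcD (animals : List (String × List String)) : PySem.Dict String (PySem.Set Int) :=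
  (EA animals).foldl (fun hc p =>
    ((dA animals).getD p.2 []).foldl (fun hc c =>
      hc.modify c PySem.Set.empty (fun s => PySem.Set.add s p.1)) hc)
    PySem.Dict.empty

def shD (animals : List (String × List String)) : PySem.Dict (Int × Int) Int :=
  (EA animals).foldl (fun sh p =>
    ((dA animals).getD p.2 []).foldl (fun sh c =>
      ((hcD animals).getD c PySem.Set.empty).foldl (fun sh j =>
        if p.1 < j then sh.modify (p.1, j) 0 (· + 1) else sh) sh) sh)
    PySem.Dict.empty

theorem solve_alt_unfold (animals : List (String × List String)) :
    solve_alt animals = (PySem.List.max? (shD animals).values (fun v => v)).getD 0 + 1 := rfl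

-- the flat stream of (characteristic, position) insertions into the index
def SA (animals : List (String × List String)) : List (String × Int) :=
  (EA animals).flatMap (fun p => ((dA animals).getD p.2 []).map (fun c => (c, p.1)))

-- the flat stream of pair keys tallied into `shared`
def KA (animals : List (String × List String)) : List (Int × Int) :=
  (EA animals).flatMap (fun p => ((dA animals).getD p.2 []).flatMap (fun c =>
    (((hcD animals).getD c PySem.Set.empty).filter (fun j => decide (p.1 < j))).map
      (fun j => (p.1, j))))

theorem getD_foldl_modify_setadd (l : List (String × Int)) (c : String) :
    ∀ (d : PySem.Dict String (PySem.Set Int)),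
      (l.foldl (fun d p => d.modify p.1 PySem.Set.empty (fun s => PySem.Set.add s p.2)) d).getD
          c PySem.Set.empty
        = PySem.Set.update (d.getD c PySem.Set.empty)
            ((l.filter (fun p => p.1 == c)).map (fun p => p.2)) := by
  induction l with
  | nil => intro d; simp [PySem.Set.update]
  | cons r t ih =>
      intro d
      rw [List.foldl_cons, ih, PySem.Dict.getD_modify, List.filter_cons]
      by_cases hc : c = r.1
      · subst hc
        simp only [beq_self_eq_true, if_pos, List.map_cons]
        rw [PySem.Set.update_cons]
      · have hb : (r.1 == c) = false := beq_eq_false_iff_ne.mpr (fun h => hc h.symm)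
        rw [if_neg hc, hb]
        simp

theorem hcD_getD (animals : List (String × List String)) (c : String) :
    (hcD animals).getD c PySem.Set.empty
      = PySem.Set.ofList (((SA animals).filter (fun p => p.1 == c)).map (fun p => p.2)) := by
  have h : hcD animals =
      (SA animals).foldl
        (fun d p => d.modify p.1 PySem.Set.empty (fun s => PySem.Set.add s p.2))
        PySem.Dict.empty := by
    simp only [hcD, SA, List.foldl_flatMap, List.foldl_map]
  rw [h, getD_foldl_modify_setadd, PySem.Dict.getD_empty]
  rfl

theorem nodup_hcD_getD (animals : List (String × List String)) (c : String) :
    ((hcD animals).getD c PySem.Set.empty).Nodup := by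
  rw [hcD_getD]; exact PySem.Set.nodup_ofList _

theorem mem_hcD (animals : List (String × List String)) (c : String) (j : Int) :
    j ∈ (hcD animals).getD c PySem.Set.empty ↔
      ∃ p ∈ EA animals, p.1 = j ∧ c ∈ (dA animals).getD p.2 [] := by
  rw [hcD_getD, PySem.Set.mem_ofList, SA]
  constructor
  · intro h
    obtain ⟨q, hq, rfl⟩ := List.mem_map.mp h
    obtain ⟨hq1, hq2⟩ := List.mem_filter.mp hq
    obtain ⟨p, hp, hq3⟩ := List.mem_flatMap.mp hq1
    obtain ⟨cc, hcc, hq4⟩ := List.mem_map.mp hq3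
    have hc : cc = c := by
      have := beq_iff_eq.mp hq2
      rw [← hq4] at this
      exact this
    refine ⟨p, hp, ?_, ?_⟩
    · rw [← hq4]
    · rw [← hc]; exact hcc
  · rintro ⟨p, hp, hj, hc⟩
    refine List.mem_map.mpr ⟨(c, p.1), List.mem_filter.mpr ⟨?_, by simp⟩, hj⟩
    exact List.mem_flatMap.mpr ⟨p, hp, List.mem_map.mpr ⟨c, hc, rfl⟩⟩

-- enumerate facts
theorem enum_fst_nodup {α : Type} (xs : List α) (s : Int) :
    ((PySem.List.enumerate xs s).map Prod.fst).Nodup := by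
  rw [List.Nodup, List.pairwise_map]
  exact (PySem.List.pairwise_lt_enumerate xs s).imp (fun hlt => ne_of_lt hlt)

theorem fst_inj {α : Type} :
    ∀ (l : List (Int × α)), (l.map Prod.fst).Nodup →
      ∀ (i : Int) (a b : α), (i, a) ∈ l → (i, b) ∈ l → a = b := by
  intro l
  induction l with
  | nil => intro _ i a b h; simp at h
  | cons r t ih =>
      intro hnd i a b ha hb
      rw [List.map_cons, List.nodup_cons] at hnd
      have hh : r.1 ∉ t.map Prod.fst := hnd.1
      rcases List.mem_cons.mp ha with ha1 | hat
      · rcases List.mem_cons.mp hb with hb1 | hbt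
        · exact (Prod.ext_iff.mp (ha1.trans hb1.symm)).2
        · exfalso
          apply hh
          rw [← ha1]
          simpa using List.mem_map_of_mem (f := Prod.fst) hbt
      · rcases List.mem_cons.mp hb with hb1 | hbt
        · exfalso
          apply hh
          rw [← hb1]
          simpa using List.mem_map_of_mem (f := Prod.fst) hat
        · exact ih hnd.2 i a b hat hbt

theorem mem_pairsOf_cons {α : Type} (q : α × α) (e : α) (t : List α) :
    q ∈ pairsOf (e :: t) ↔ (q.1 = e ∧ q.2 ∈ t) ∨ q ∈ pairsOf t := by
  simp only [pairsOf, List.mem_append, List.mem_map]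
  constructor
  · rintro (⟨y, hy, hq⟩ | hr)
    · subst hq; exact Or.inl ⟨rfl, hy⟩
    · exact Or.inr hr
  · rintro (⟨h1, h2⟩ | hr)
    · exact Or.inl ⟨q.2, h2, by rw [← h1]⟩
    · exact Or.inr hr

theorem enum_lb {α : Type} (xs : List α) (s : Int) (p : Int × α)
    (h : p ∈ PySem.List.enumerate xs s) : s ≤ p.1 := by
  rw [PySem.List.mem_enumerate_iff] at h
  obtain ⟨k, hk, rfl⟩ := h
  simp

theorem pairsOf_enumerate {α : Type} (p q : Int × α) :
    ∀ (xs : List α) (s : Int),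
      (p, q) ∈ pairsOf (PySem.List.enumerate xs s) ↔
        p ∈ PySem.List.enumerate xs s ∧ q ∈ PySem.List.enumerate xs s ∧ p.1 < q.1 := by
  intro xs
  induction xs with
  | nil => intro s; simp [PySem.List.enumerate_nil, pairsOf]
  | cons x t ih =>
      intro s
      rw [PySem.List.enumerate_cons, mem_pairsOf_cons]
      constructor
      · rintro (⟨h1, h2⟩ | hr)
        · have hq := enum_lb t (s + 1) q h2
          have hp1 : p = (s, x) := h1
          have hps : p.1 = s := by rw [hp1]
          refine ⟨?_, List.mem_cons_of_mem _ h2, by omega⟩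
          rw [hp1]
          exact List.mem_cons_self
        · obtain ⟨hp, hq, hlt⟩ := (ih (s + 1)).mp hr
          exact ⟨List.mem_cons_of_mem _ hp, List.mem_cons_of_mem _ hq, hlt⟩
      · rintro ⟨hp, hq, hlt⟩
        rcases List.mem_cons.mp hp with hp1 | hpt
        · left
          refine ⟨hp1, ?_⟩
          rcases List.mem_cons.mp hq with hq1 | hqt
          · exfalso
            have h1 : p.1 = s := by rw [hp1]
            have h2 : q.1 = s := by rw [hq1]
            omega
          · exact hqt
        · right
          have hps := enum_lb t (s + 1) p hpt
          rcases List.mem_cons.mp hq with hq1 | hqt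
          · exfalso
            have h2 : q.1 = s := by rw [hq1]
            omega
          · exact (ih (s + 1)).mpr ⟨hpt, hqt, hlt⟩

-- counts over the tally key stream
theorem count_flatMap' {α : Type} (g : α → List (Int × Int)) (b : Int × Int) :
    ∀ (l : List α), (l.flatMap g).count b = (l.map (fun x => (g x).count b)).sum := by
  intro l
  induction l with
  | nil => simp
  | cons x t ih => simp [List.flatMap_cons, List.count_append, ih]

theorem count_map_pair (x i j : Int) (lst : List Int) :
    (lst.map (fun j' => (x, j'))).count (i, j) = if x = i then lst.count j else 0 := by
  induction lst with
  | nil => simp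
  | cons y t ih =>
      rw [List.map_cons, List.count_cons, ih, List.count_cons]
      by_cases hx : x = i
      · subst hx
        by_cases hy : y = j
        · subst hy; simp
        · simp [Prod.ext_iff, hy]
      · simp [Prod.ext_iff, hx]

theorem count_filter_ite (l : List Int) (P : Int → Bool) (a : Int) :
    (l.filter P).count a = if P a then l.count a else 0 := by
  by_cases h : P a
  · rw [if_pos h, List.count_filter h]
  · rw [if_neg h, List.count_eq_zero]
    intro hm
    exact h (List.of_mem_filter hm)

theorem count_nodup (l : List Int) (h : l.Nodup) (a : Int) :
    l.count a = if a ∈ l then 1 else 0 := by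
  by_cases hm : a ∈ l
  · rw [if_pos hm, List.count_eq_one_of_mem h hm]
  · rw [if_neg hm, List.count_eq_zero]
    exact hm

theorem sum_single {α : Type} (i : Int) (a : α) (h : Int × α → Nat) :
    ∀ (l : List (Int × α)), (l.map Prod.fst).Nodup → (i, a) ∈ l →
      (l.map (fun p => if p.1 = i then h p else 0)).sum = h (i, a) := by
  intro l
  induction l with
  | nil => intro _ hm; simp at hm
  | cons r t ih =>
      intro hnd hm
      rw [List.map_cons, List.nodup_cons] at hnd
      rw [List.map_cons, List.sum_cons]
      rcases List.mem_cons.mp hm with h1 | ht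
      · subst h1
        have hz : (t.map (fun p => if p.1 = i then h p else 0)).sum = 0 := by
          apply List.sum_eq_zero
          intro v hv
          obtain ⟨p, hp, rfl⟩ := List.mem_map.mp hv
          have hne : p.1 ≠ i := fun hctr =>
            hnd.1 (by simpa [← hctr] using List.mem_map_of_mem (f := Prod.fst) hp)
          simp [hne]
        rw [hz]
        simp
      · have hr : r.1 ≠ i := fun hctr =>
          hnd.1 (by
            rw [hctr]
            simpa using List.mem_map_of_mem (f := Prod.fst) ht)
        rw [if_neg hr, ih hnd.2 ht]
        omega

theorem countP_as_sum (ys : List String) :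
    ∀ (l : List String),
      (l.map (fun c => if c ∈ ys then 1 else 0)).sum = l.countP (fun c => decide (c ∈ ys)) := by
  intro l
  induction l with
  | nil => simp
  | cons x t ih =>
      rw [List.map_cons, List.sum_cons, ih, List.countP_cons]
      by_cases h : x ∈ ys <;> simp [h, Nat.add_comm]

theorem share_eq_countP (xs ys : List String) :
    share xs ys = (xs.countP (fun x => decide (x ∈ ys)) : Int) := by
  rw [share]
  have hfun : (fun (c : Int) (ch : String) => if ch ∈ ys then c + 1 else c)
      = fun acc x => if (fun x => decide (x ∈ ys)) x = true then acc + 1 else acc := by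
    funext c ch
    simp
  rw [hfun, PySem.List.foldl_count_if]
  ring

-- shD as a flat counting loop
theorem shD_eq (animals : List (String × List String)) :
    shD animals = (KA animals).foldl (fun sh k => sh.modify k 0 (· + 1)) PySem.Dict.empty := by
  simp only [shD, KA, List.foldl_flatMap, List.foldl_map, List.foldl_filter,
    decide_eq_true_eq]

theorem getD_shD (animals : List (String × List String)) (k : Int × Int) :
    (shD animals).getD k 0 = ((KA animals).count k : Int) := by
  rw [shD_eq, PySem.Dict.getD_foldl_modify_add_one, PySem.Dict.getD_empty]
  ring

theorem keys_shD (animals : List (String × List String)) :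
    (shD animals).keys = PySem.Set.ofList (KA animals) := by
  rw [shD_eq, PySem.Dict.keys_foldl_modify, PySem.Dict.keys_empty, PySem.Set.update_nil_left]

-- the tally at an index pair is A's shared count for that pair
theorem count_KA (animals : List (String × List String)) (p q : Int × String)
    (hpq : (p, q) ∈ pairsOf (EA animals)) :
    ((KA animals).count (p.1, q.1) : Int)
      = share ((dA animals).getD p.2 []) ((dA animals).getD q.2 []) := by
  obtain ⟨hp, hq, hlt⟩ := (pairsOf_enumerate p q (dA animals).keys 0).mp (by rwa [EA] at hpq)
  have hpE : p ∈ EA animals := hp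
  have hqE : q ∈ EA animals := hq
  have hnd : ((EA animals).map Prod.fst).Nodup := enum_fst_nodup (dA animals).keys 0
  have hmem_iff : ∀ c : String,
      (q.1 ∈ (hcD animals).getD c PySem.Set.empty) ↔ c ∈ (dA animals).getD q.2 [] := by
    intro c
    rw [mem_hcD]
    constructor
    · rintro ⟨r, hr, hr1, hrc⟩
      have hr' : (q.1, r.2) ∈ EA animals := by rw [← hr1, Prod.mk.eta]; exact hr
      have hq' : (q.1, q.2) ∈ EA animals := by rw [Prod.mk.eta]; exact hqE
      have h2 : r.2 = q.2 := fst_inj (EA animals) hnd q.1 r.2 q.2 hr' hq'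
      rwa [h2] at hrc
    · intro hc
      exact ⟨q, hqE, rfl, hc⟩
  rw [KA, count_flatMap']
  have hterm : ∀ r ∈ EA animals,
      (((dA animals).getD r.2 []).flatMap (fun c =>
        (((hcD animals).getD c PySem.Set.empty).filter (fun j => decide (r.1 < j))).map
          (fun j => (r.1, j)))).count (p.1, q.1)
      = if r.1 = p.1 then
          (((dA animals).getD r.2 []).map
            (fun c => if c ∈ (dA animals).getD q.2 [] then 1 else 0)).sum
        else 0 := by
    intro r _
    rw [count_flatMap']
    by_cases hrp : r.1 = p.1
    · rw [if_pos hrp]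
      congr 1
      apply List.map_congr_left
      intro c _
      rw [count_map_pair, if_pos hrp, hrp, count_filter_ite,
        if_pos (by simpa using hlt), count_nodup _ (nodup_hcD_getD animals c)]
      simp only [hmem_iff c]
    · rw [if_neg hrp]
      apply List.sum_eq_zero
      intro v hv
      obtain ⟨c, _, rfl⟩ := List.mem_map.mp hv
      rw [count_map_pair, if_neg hrp]
  rw [List.map_congr_left hterm,
    sum_single p.1 p.2 _ (EA animals) hnd (by rw [Prod.mk.eta]; exact hpE),
    countP_as_sum, share_eq_countP]

-- witness extraction: every tallied key is some pair's key
theorem KA_mem (animals : List (String × List String)) (k : Int × Int) (hk : k ∈ KA animals) :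
    ∃ p q, (p, q) ∈ pairsOf (EA animals) ∧ k = (p.1, q.1) := by
  rw [KA, List.mem_flatMap] at hk
  obtain ⟨p, hp, hk2⟩ := hk
  rw [List.mem_flatMap] at hk2
  obtain ⟨c, hc, hk3⟩ := hk2
  obtain ⟨j, hj, rfl⟩ := List.mem_map.mp hk3
  have hjf := List.mem_filter.mp hj
  have hjlt : p.1 < j := by simpa using hjf.2
  obtain ⟨q, hq, rfl, _⟩ := (mem_hcD animals c j).mp hjf.1
  exact ⟨p, q, (pairsOf_enumerate p q (dA animals).keys 0).mpr ⟨by rwa [EA] at hp, by rwa [EA] at hq, hjlt⟩, rfl⟩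

theorem maxD0_eq_sup0 (l : List Int) (hpos : ∀ v ∈ l, 0 ≤ v) :
    (PySem.List.max? l (fun v => v)).getD 0 = sup0 l := by
  cases l with
  | nil => rfl
  | cons x t =>
      rw [PySem.List.max?_id_cons, Option.getD_some, sup0, List.foldl_cons]
      have : max 0 x = x := max_eq_right (hpos x (List.mem_cons_self ..))
      rw [this]

theorem sup0_le (l : List Int) (c : Int) (h0 : 0 ≤ c) (hl : ∀ v ∈ l, v ≤ c) : sup0 l ≤ c := by
  rcases PySem.List.foldl_max_mem l 0 with hz | hmem
  · rw [sup0, hz]; exact h0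
  · exact hl _ hmem

theorem sup0_nonneg (l : List Int) : 0 ≤ sup0 l := (PySem.List.le_foldl_max l 0).1

theorem solve_alt_eq (animals : List (String × List String)) :
    solve_alt animals = bestOf animals + 1 := by
  rw [solve_alt_unfold]
  congr 1
  have hndk : (shD animals).keys.Nodup := by
    rw [keys_shD]; exact PySem.Set.nodup_ofList _
  have hvals : (shD animals).values = (shD animals).keys.map (fun k => (shD animals).getD k 0) :=
    PySem.Dict.values_eq_map_keys _ hndk 0
  have hvpos : ∀ v ∈ (shD animals).values, 0 ≤ v := by
    intro v hv
    rw [hvals] at hv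
    obtain ⟨k, _, rfl⟩ := List.mem_map.mp hv
    rw [getD_shD]
    positivity
  rw [maxD0_eq_sup0 _ hvpos]
  apply le_antisymm
  · apply sup0_le _ _ (sup0_nonneg _)
    intro v hv
    rw [hvals] at hv
    obtain ⟨k, hk, rfl⟩ := List.mem_map.mp hv
    rw [keys_shD, PySem.Set.mem_ofList] at hk
    obtain ⟨p, q, hpq, rfl⟩ := KA_mem animals _ hk
    rw [getD_shD, count_KA animals p q hpq]
    exact (PySem.List.le_foldl_max _ 0).2 _ (List.mem_map_of_mem hpq)
  · apply sup0_le _ _ (sup0_nonneg _)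
    intro w hw
    obtain ⟨r, hr, rfl⟩ := List.mem_map.mp hw
    obtain ⟨p, q⟩ := r
    rw [← count_KA animals p q hr, ← getD_shD]
    by_cases hk : (p.1, q.1) ∈ (shD animals).keys
    · refine (PySem.List.le_foldl_max _ 0).2 _ ?_
      rw [hvals]
      exact List.mem_map_of_mem hk
    · rw [keys_shD, PySem.Set.mem_ofList] at hk
      rw [getD_shD]
      have : (KA animals).count (p.1, q.1) = 0 := List.count_eq_zero.mpr hk
      rw [this]
      exact sup0_nonneg _

-- ===== VERDICT (by name: the statement is the Claim_ definition above) =====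
theorem solve_spec : Claim_equal_solve := by
  intro animals _
  show solve animals = solve_alt animals
  rw [solve_eq, solve_alt_eq]
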